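-- pv_equiv track=rewrite | github.com/TokamLilian/Boggle_Project | boggle.py | calcul_point
-- ===== SOURCE A (Python) =====
-- def calcul_point(taille, mot):                                           #cette fonction retourne le nombre de point pour d'un mot, en fontion de leur longueur
--     pts = 0
--
--     if (taille**2) > 25 and len(mot) >= 7:                               #pour les grilles de taille 6x6 et plus, à partir d'une longueur de 7,
--         pts += 7                                                         #les points sont attribués différenments
--
--         for longueur in range (7,9):                                     #on traitera uniquement la longueur 7 et 9 car pour les longeurs <7, l'attribution de points est la
--                                                                          #meme que pour une grille de taille 4x4
--             if len(mot) >= 9: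
--                 point = 12                                               #pour cette grille, à partir d'une longueur 9, on a 12 points
--                 return point
--
--             if len(mot) == longueur:
--                 point = pts
--                 return point
--             else:
--                 pts += 3                                                 #pour un mot de taille 8, on a 10 points
--
--     if len(mot) >= 8:
--         point = 10                                                       #pour toutes les grilles de taille 5x5 en decendant, un mot de taille 8 donne 10 points
--         return point
--
--     if (taille**2) == 25 and len(mot) >= 6:                              #pour la grille de taille 5x5 à partir d'une longueur de 6, les points sont attribues differenments
--         pts += 4
--
--         for longueur in range (6,8):
--         #on traitera uniquement la longueur 6 et 7 car pour les longeurs < 6, l'attribution de points est la meme que pour une grille de taille 4x4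
--             if len(mot) == longueur:
--                 point = pts
--                 return point
--             else:
--                 pts += 2                                                 #pour un mot de taille 7, on a 6 points
--
--     else:                                                                #pour les grilles inferieures ou egales à la taille 4x4 ainsi que les mots de longueur
--         for longueur in range (3,10):                                    #inferieures à 6
--             if longueur <=  5:
--                 pts += 1
--             if longueur == 6:
--                 pts += 2
--             if longueur == 7:
--                 pts += 3
--             if len(mot) == longueur:
--                 point = pts
--
--                 return point
-- ===== SOURCE B (Python) =====
-- def calcul_point(taille, mot):
--     t2 = taille * taille
--     n = len(mot)
--     if t2 > 25 and n >= 7: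
--         return 12 if n >= 9 else (10 if n == 8 else 7)
--     if n >= 8:
--         return 10
--     if t2 == 25 and n >= 6:
--         return 4 if n == 6 else 6
--     return {3: 1, 4: 2, 5: 3, 6: 5, 7: 8}.get(n)
-- ===== Notes on version B (the rewrite author's own statement) =====
-- stated objective: simpler
-- what changed: Replaced A's three accumulator loops with early returns by a direct conditional cascade plus a score-table dict lookup computed from the grid size squared and the word length.
import Mathlib
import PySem

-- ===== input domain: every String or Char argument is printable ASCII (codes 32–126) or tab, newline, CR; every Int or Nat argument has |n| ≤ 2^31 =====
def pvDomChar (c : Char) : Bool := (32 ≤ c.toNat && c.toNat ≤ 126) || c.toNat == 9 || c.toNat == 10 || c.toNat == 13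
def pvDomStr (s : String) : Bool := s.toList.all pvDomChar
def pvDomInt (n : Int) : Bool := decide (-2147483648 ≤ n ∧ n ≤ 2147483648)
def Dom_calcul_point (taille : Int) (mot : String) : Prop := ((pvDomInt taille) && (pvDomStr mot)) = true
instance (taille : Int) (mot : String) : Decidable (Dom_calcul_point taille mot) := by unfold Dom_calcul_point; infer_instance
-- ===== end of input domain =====

-- B replaces A's three accumulate-and-return loops by a direct conditional cascade with a
-- score-table dict lookup; same return value everywhere (including the implicit None).

-- ===== PORT A =====
-- the 'for longueur in range(7,9)' loop of A's big-grid branch (early return, pts += 3 otherwise)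
def pvLoopBig (n : Int) : Int → List Int → Option Int
  | _, [] => none
  | pts, l :: rest =>
      if n ≥ 9 then some 12
      else if n = l then some pts
      else pvLoopBig n (pts + 3) rest

-- the 'for longueur in range(6,8)' loop of A's 5x5 branch (early return, pts += 2 otherwise)
def pvLoopFive (n : Int) : Int → List Int → Option Int
  | _, [] => none
  | pts, l :: rest =>
      if n = l then some pts
      else pvLoopFive n (pts + 2) rest

-- the 'for longueur in range(3,10)' loop of A's default branch
def pvLoopBase (n : Int) : Int → List Int → Option Int
  | _, [] => none
  | pts, l :: rest =>
      let pts := pts + (if l ≤ 5 then 1 else 0)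
      let pts := pts + (if l = 6 then 2 else 0)
      let pts := pts + (if l = 7 then 3 else 0)
      if n = l then some pts
      else pvLoopBase n pts rest

def calcul_point (taille : Int) (mot : String) : Option Int :=
  let pts : Int := 0
  let r1 :=
    if taille ^ 2 > 25 ∧ PySem.Str.len mot ≥ 7 then
      pvLoopBig (PySem.Str.len mot) (pts + 7) (PySem.List.pyRange 7 9 1)
    else none
  match r1 with
  | some v => some v
  | none =>
    if PySem.Str.len mot ≥ 8 then some 10
    else if taille ^ 2 = 25 ∧ PySem.Str.len mot ≥ 6 then
      pvLoopFive (PySem.Str.len mot) (pts + 4) (PySem.List.pyRange 6 8 1)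
    else
      pvLoopBase (PySem.Str.len mot) pts (PySem.List.pyRange 3 10 1)

-- ===== PORT B =====
def calcul_point_alt (taille : Int) (mot : String) : Option Int :=
  let t2 := taille * taille
  let n := PySem.Str.len mot
  if t2 > 25 ∧ n ≥ 7 then some (if n ≥ 9 then 12 else if n = 8 then 10 else 7)
  else if n ≥ 8 then some 10
  else if t2 = 25 ∧ n ≥ 6 then some (if n = 6 then 4 else 6)
  else (PySem.Dict.ofList [((3 : Int), (1 : Int)), (4, 2), (5, 3), (6, 5), (7, 8)]).get? n

-- ===== PRECONDITION & SPEC =====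
def Spec_calcul_point (taille : Int) (mot : String) (out : Option Int) : Prop := out = calcul_point_alt taille mot
instance (taille : Int) (mot : String) (out : Option Int) : Decidable (Spec_calcul_point taille mot out) := by unfold Spec_calcul_point; infer_instance

-- ===== CLAIM (what is proved, stated in full; the proofs are below) =====
def Claim_equal_calcul_point : Prop := ∀ (taille : Int) (mot : String), Dom_calcul_point taille mot → Spec_calcul_point taille mot (calcul_point taille mot)

-- ===== LEMMAS AND PROOFS =====

-- ===== VERDICT (by name: the statement is the Claim_ definition above) =====
theorem calcul_point_spec : Claim_equal_calcul_point := by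
  intro taille mot _
  unfold Spec_calcul_point calcul_point calcul_point_alt
  have hsq : taille ^ 2 = taille * taille := by ring
  set n := PySem.Str.len mot with hdefn
  have hn : 0 ≤ n := by rw [hdefn, PySem.Str.len_eq]; positivity
  have h79 : PySem.List.pyRange 7 9 1 = [7, 8] := by decide
  have h68 : PySem.List.pyRange 6 8 1 = [6, 7] := by decide
  have h310 : PySem.List.pyRange 3 10 1 = [3, 4, 5, 6, 7, 8, 9] := by decide
  have hof : PySem.Dict.ofList [((3 : Int), (1 : Int)), (4, 2), (5, 3), (6, 5), (7, 8)]
      = PySem.Dict.mk [((3 : Int), (1 : Int)), (4, 2), (5, 3), (6, 5), (7, 8)] := by decide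
  simp only [hsq, h79, h68, h310, hof]
  by_cases hb : taille * taille > 25 ∧ n ≥ 7
  · by_cases h9 : n ≥ 9
    · simp [hb, pvLoopBig, h9]
    · by_cases h8 : n = 8
      · simp [hb, pvLoopBig, h8]
      · have h7 : n = 7 := by omega
        simp [hb, pvLoopBig, h7]
  · by_cases h8 : n ≥ 8
    · simp [hb, h8]
    · by_cases h5 : taille * taille = 25 ∧ n ≥ 6
      · by_cases h6 : n = 6
        · simp [h5, pvLoopFive, h6]
        · have h7 : n = 7 := by omega
          simp [h5, pvLoopFive, h7]
      · simp [hb, h8, h5, pvLoopBase, PySem.Dict.get?_mk_cons]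
        split_ifs <;> first | rfl | omega
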